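-- pv_equiv track=rewrite | github.com/SSAFY-6th-SEOUL3/algorithm_study | study/jh_0731_problem_solving/KAKAO_2022_신고 결과 받기/s2.py | solution
-- ===== SOURCE A (Python) =====
-- def solution(id_list, report, k):
--     reported_by = {name: set() for name in id_list}
--     counts = {name: 0 for name in id_list}
--
--     for info in report:
--         a, b = info.split(' ')
--         reported_by[b].add(a)
--
--     for name, reporters in reported_by.items():
--         if len(reporters) >= k:
--             for reporter in reporters:
--                 counts[reporter] += 1
--
--     return [count for count in counts.values()]
-- ===== SOURCE B (Python) =====
-- def solution(id_list, report, k):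
--     # Deduplicate reports into a flat set of (reporter, reported) pairs, then compute
--     # each user's answer independently by counting over that set -- no mutable
--     # per-user counters or fan-out loops.
--     pairs = {(a, b) for a, b in (info.split(' ') for info in report)}
--     names = list(dict.fromkeys(id_list))
--     banned = {b for b in names if sum(x == b for _, x in pairs) >= k}
--     return [sum(b in banned for a, b in pairs if a == name) for name in names]
-- ===== Notes on version B (the rewrite author's own statement) =====
-- stated objective: alternative
-- what changed: A maintains mutable dicts (per-user reporter sets and counters) and fans out over each banned user's reporters; B builds one deduplicated flat set of (reporter, reported) pairs and then computes every user's answer independently by counting over that set, with no counters and no fan-out loop.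
import Mathlib
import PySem

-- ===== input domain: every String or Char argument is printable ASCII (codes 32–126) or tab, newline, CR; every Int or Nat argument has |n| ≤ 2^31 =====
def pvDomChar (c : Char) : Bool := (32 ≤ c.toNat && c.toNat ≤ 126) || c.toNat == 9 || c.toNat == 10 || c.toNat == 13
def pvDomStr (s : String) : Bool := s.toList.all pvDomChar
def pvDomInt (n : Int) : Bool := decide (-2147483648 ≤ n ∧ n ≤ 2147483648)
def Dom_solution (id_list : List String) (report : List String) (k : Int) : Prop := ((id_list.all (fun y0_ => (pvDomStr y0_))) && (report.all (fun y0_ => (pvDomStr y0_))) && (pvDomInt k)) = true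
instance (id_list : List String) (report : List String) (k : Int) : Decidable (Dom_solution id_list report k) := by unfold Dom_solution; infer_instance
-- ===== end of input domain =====

-- B replaces A's mutable dicts (per-user reporter sets + counters with a banned fan-out) by one
-- deduplicated flat pair set over which each user's answer is counted independently.


-- ===== PORT A =====
-- {name: 0 for name in id_list} (A's counts dict)
def pvZeroDict (id_list : List String) : PySem.Dict String Int :=
  id_list.foldl (fun d name => d.insert name 0) PySem.Dict.empty

-- one step of A's first loop: a, b = info.split(' '); reported_by[b].add(a)
-- (under Pre_ b is a key, so modify's default is never used; KeyError inputs are excluded by Pre_)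
def pvRecordA (d : PySem.Dict String (PySem.Set String)) (info : String) :
    PySem.Dict String (PySem.Set String) :=
  match PySem.Str.split? info " " with
  | some [a, b] => d.modify b PySem.Set.empty (fun s => s.add a)
  | _ => d

-- one step of A's second loop: if len(reporters) >= k: for reporter in reporters: counts[reporter] += 1
-- (under Pre_ every reporter bumped here is a key of counts; KeyError inputs are excluded by Pre_)
def pvCreditA (k : Int) (c : PySem.Dict String Int) (p : String × PySem.Set String) :
    PySem.Dict String Int :=
  if PySem.Set.len p.2 ≥ k then
    p.2.foldl (fun c r => c.modify r 0 (· + 1)) c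
  else c

def solution (id_list : List String) (report : List String) (k : Int) : List Int :=
  let reported_by : PySem.Dict String (PySem.Set String) :=
    id_list.foldl (fun d name => d.insert name PySem.Set.empty) PySem.Dict.empty
  let counts := pvZeroDict id_list
  let reported_by := report.foldl pvRecordA reported_by
  let counts := reported_by.items.foldl (pvCreditA k) counts
  counts.values

-- ===== PORT B =====
-- a, b = info.split(' ')  (the _ => branch is the ValueError case, excluded by Pre_)
def pvParse (info : String) : String × String :=
  match PySem.Str.split? info " " with
  | some [a, b] => (a, b)
  | _ => ("", "")

def solution_alt (id_list : List String) (report : List String) (k : Int) : List Int :=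
  let pairs : PySem.Set (String × String) :=
    PySem.Set.ofList (report.map pvParse)
  let names : List String := PySem.List.dedup id_list
  let banned : PySem.Set String :=
    PySem.Set.ofList (names.filter (fun b =>
      k ≤ ((pairs.countP (fun p => p.2 == b) : Nat) : Int)))
  names.map (fun name =>
    (((pairs.filter (fun p => p.1 == name)).countP (fun p => banned.contains p.2) : Nat) : Int))

-- ===== PRECONDITION & SPEC =====
-- number of distinct reporters of b in report (a closed-form count over the input)
def pvReporters (report : List String) (b : String) : Int :=
  (((PySem.Set.ofList (report.map pvParse)).countP (fun p => p.2 == b) : Nat) : Int)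

-- Pre_ = exactly the inputs on which A returns: outside it A raises ValueError (a report line
-- that does not split into exactly two fields) or KeyError (a reported name not in id_list, or
-- a reporter of a name with at least k distinct reporters not in id_list).
def Pre_solution (id_list : List String) (report : List String) (k : Int) : Prop :=
  ∀ info ∈ report,
    ((PySem.Str.split? info " ").getD []).length = 2 ∧
    (pvParse info).2 ∈ id_list ∧
    (k ≤ pvReporters report (pvParse info).2 → (pvParse info).1 ∈ id_list)
instance (id_list : List String) (report : List String) (k : Int) : Decidable (Pre_solution id_list report k) := by unfold Pre_solution; infer_instance

def pvWitness_solution : List String × List String × Int := (["muzi", "frodo"], ["muzi frodo", "frodo muzi"], 1)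

def Spec_solution (id_list : List String) (report : List String) (k : Int) (out : List Int) : Prop := out = solution_alt id_list report k
instance (id_list : List String) (report : List String) (k : Int) (out : List Int) : Decidable (Spec_solution id_list report k out) := by unfold Spec_solution; infer_instance

-- ===== CLAIM (what is proved, stated in full; the proofs are below) =====
def Claim_equal_solution : Prop := ∀ (id_list : List String) (report : List String) (k : Int), Dom_solution id_list report k → Pre_solution id_list report k → Spec_solution id_list report k (solution id_list report k)

-- ===== LEMMAS AND PROOFS =====

-- A's first loop, on parsed pairs
def pvRecP (d : PySem.Dict String (PySem.Set String)) (p : String × String) :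
    PySem.Dict String (PySem.Set String) :=
  d.modify p.2 PySem.Set.empty (fun s => s.add p.1)

lemma pvSplit_some {info : String}
    (h : ((PySem.Str.split? info " ").getD []).length = 2) :
    ∃ a b, PySem.Str.split? info " " = some [a, b] := by
  cases hs : PySem.Str.split? info " " with
  | none => rw [hs] at h; simp at h
  | some parts =>
    rw [hs] at h
    match parts, h with
    | [a, b], _ => exact ⟨a, b, rfl⟩

lemma pvFoldA_eq (l : List String) (d : PySem.Dict String (PySem.Set String))
    (h : ∀ info ∈ l, ((PySem.Str.split? info " ").getD []).length = 2) :
    l.foldl pvRecordA d = (l.map pvParse).foldl pvRecP d := by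
  induction l generalizing d with
  | nil => rfl
  | cons info t ih =>
    obtain ⟨a, b, hs⟩ := pvSplit_some (h info (by simp))
    simp only [List.foldl_cons, List.map_cons]
    rw [show pvRecordA d info = pvRecP d (pvParse info) by simp [pvRecordA, pvRecP, pvParse, hs]]
    exact ih _ (fun i hi => h i (by simp [hi]))

lemma pvGetD_init {ν : Type} (v : ν) (ids : List String) (d : PySem.Dict String ν)
    (h : ∀ y, d.getD y v = v) (x : String) :
    (ids.foldl (fun d n => d.insert n v) d).getD x v = v := by
  induction ids generalizing d with
  | nil => exact h x
  | cons n t ih =>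
    simp only [List.foldl_cons]
    exact ih _ (fun y => by rw [PySem.Dict.getD_insert]; split <;> simp [h])

lemma pvKeys_init {ν : Type} (v : ν) (ids : List String) :
    (ids.foldl (fun d n => d.insert n v) PySem.Dict.empty).keys = PySem.Set.ofList ids := by
  rw [PySem.Dict.keys_foldl_insert ids (fun _ _ => v) PySem.Dict.empty,
    PySem.Set.ofList_eq_foldl]
  rfl

lemma pvSet_update_self (s : PySem.Set String) (xs : List String) (h : ∀ x ∈ xs, x ∈ s) :
    PySem.Set.update s xs = s := by
  induction xs generalizing s with
  | nil => rfl
  | cons x t ih =>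
    have : PySem.Set.update s (x :: t) = PySem.Set.update (s.add x) t := rfl
    rw [this, PySem.Set.add_of_mem (h x (by simp))]
    exact ih s (fun y hy => h y (by simp [hy]))

lemma pvMem_fstFilter (ps : List (String × String)) (b x : String) :
    x ∈ (ps.filter (fun p => p.2 == b)).map Prod.fst ↔ (x, b) ∈ ps := by
  constructor
  · rintro hm
    simp only [List.mem_map, List.mem_filter, beq_iff_eq] at hm
    obtain ⟨p, ⟨hp, h2⟩, h1⟩ := hm
    have : p = (x, b) := Prod.ext h1 h2
    exact this ▸ hp
  · intro hm
    exact List.mem_map.2 ⟨(x, b), List.mem_filter.2 ⟨hm, by simp⟩, rfl⟩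

-- the bridge invariant: A's per-user reporter sets are the per-user slices of the
-- deduplicated flat pair set B works with
lemma pvInvA (q : List (String × String)) (d : PySem.Dict String (PySem.Set String))
    (s : PySem.Set (String × String))
    (h1 : ∀ b, d.getD b PySem.Set.empty = (s.filter (fun p => p.2 == b)).map Prod.fst) :
    ∀ b, (q.foldl pvRecP d).getD b PySem.Set.empty
        = ((q.foldl PySem.Set.add s).filter (fun p => p.2 == b)).map Prod.fst := by
  induction q generalizing d s with
  | nil => exact h1
  | cons p t ih =>
    simp only [List.foldl_cons]
    by_cases hp : p ∈ s
    · rw [PySem.Set.add_of_mem hp]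
      apply ih
      intro b
      by_cases hb : b = p.2
      · subst hb
        rw [pvRecP, PySem.Dict.getD_modify_self, h1 p.2,
          PySem.Set.add_of_mem ((pvMem_fstFilter s p.2 p.1).2 (by simpa using hp))]
      · rw [pvRecP, PySem.Dict.getD_modify_of_ne _ _ _ hb, h1 b]
    · rw [PySem.Set.add_of_not_mem hp]
      apply ih
      intro b
      by_cases hb : b = p.2
      · subst hb
        have hnm : p.1 ∉ (s.filter (fun q => q.2 == p.2)).map Prod.fst := by
          intro hmem
          exact hp (by simpa using (pvMem_fstFilter s p.2 p.1).1 hmem)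
        rw [pvRecP, PySem.Dict.getD_modify_self, h1 p.2,
          PySem.Set.add_of_not_mem hnm, List.filter_append, List.map_append]
        simp
      · rw [pvRecP, PySem.Dict.getD_modify_of_ne _ _ _ hb, h1 b, List.filter_append]
        have : ((([p] : List (String × String)).filter (fun q => q.2 == b))) = [] := by
          simp [Ne.symm hb]
        simp [this]

lemma pvBump_keys (l : List String) (c : PySem.Dict String Int) (h : ∀ r ∈ l, r ∈ c.keys) :
    (l.foldl (fun c r => c.modify r 0 (· + 1)) c).keys = c.keys := by
  induction l generalizing c with
  | nil => rfl
  | cons r t ih =>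
    simp only [List.foldl_cons]
    have hk : (c.modify r 0 (· + 1)).keys = c.keys := by
      rw [PySem.Dict.keys_modify, PySem.Dict.keys_insert_of_contains]
      exact (PySem.Dict.contains_iff_mem_keys c r).2 (h r (by simp))
    rw [ih _ (fun y hy => by rw [hk]; exact h y (by simp [hy])), hk]

lemma pvCreditA_keys (k : Int) (items : List (String × PySem.Set String))
    (c : PySem.Dict String Int)
    (h : ∀ p ∈ items, PySem.Set.len p.2 ≥ k → ∀ r ∈ p.2, r ∈ c.keys) :
    (items.foldl (pvCreditA k) c).keys = c.keys := by
  induction items generalizing c with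
  | nil => rfl
  | cons p t ih =>
    simp only [List.foldl_cons]
    have hk : (pvCreditA k c p).keys = c.keys := by
      unfold pvCreditA
      split
      · next hc => exact pvBump_keys _ _ (h p (by simp) hc)
      · rfl
    rw [ih _ (fun q hq hlen r hr => by rw [hk]; exact h q (by simp [hq]) hlen r hr), hk]

lemma pvCreditA_getD (k : Int) (items : List (String × PySem.Set String))
    (c : PySem.Dict String Int) (x : String) :
    (items.foldl (pvCreditA k) c).getD x 0
      = c.getD x 0 + (items.map (fun p => if PySem.Set.len p.2 ≥ k then (p.2.count x : Int) else 0)).sum := by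
  induction items generalizing c with
  | nil => simp
  | cons p t ih =>
    simp only [List.foldl_cons, List.map_cons, List.sum_cons]
    rw [ih]
    have hstep : (pvCreditA k c p).getD x 0
        = c.getD x 0 + (if PySem.Set.len p.2 ≥ k then (p.2.count x : Int) else 0) := by
      unfold pvCreditA
      split
      · rw [PySem.Dict.getD_foldl_modify_add_one]
      · simp
    rw [hstep]; ring

lemma pvSum_ite_zero (a : String) (c : Nat) (K : List String) (hnd : K.Nodup) (ha : a ∈ K) :
    (K.map (fun b => if a == b then c else 0)).sum = c := by
  induction K with
  | nil => simp at ha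
  | cons b t ih =>
    simp only [List.map_cons, List.sum_cons]
    by_cases hab : a = b
    · subst hab
      have hnt : a ∉ t := (List.nodup_cons.1 hnd).1
      have : (t.map (fun b' => if a == b' then c else 0)).sum = 0 := by
        apply List.sum_eq_zero
        intro y hy
        obtain ⟨b', hb', rfl⟩ := List.mem_map.1 hy
        simp [show a ≠ b' from fun h => hnt (h ▸ hb')]
      rw [this]
      simp
    · have hat : a ∈ t := by rcases List.mem_cons.1 ha with h | h; exact absurd h hab; exact h
      rw [ih (List.nodup_cons.1 hnd).2 hat]
      simp [hab]

lemma pvCountP_partition (K : List String) (ps : List (String × String))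
    (Q : String × String → Bool) (hnd : K.Nodup) (h : ∀ p ∈ ps, p.2 ∈ K) :
    ps.countP Q = (K.map (fun b => (ps.filter (fun p => p.2 == b)).countP Q)).sum := by
  induction ps with
  | nil => simp [List.countP_nil, List.sum_eq_zero]
  | cons p t ih =>
    rw [List.countP_cons, ih (fun q hq => h q (by simp [hq]))]
    have hcong : ∀ b ∈ K,
        ((p :: t).filter (fun q => q.2 == b)).countP Q
          = (fun b => (if p.2 == b then (if Q p then 1 else 0) else 0)
              + (t.filter (fun q => q.2 == b)).countP Q) b := by
      intro b _
      by_cases hb : p.2 = b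
      · simp [hb, List.countP_cons, Nat.add_comm]
      · simp [hb]
    rw [List.map_congr_left hcong, List.sum_map_add,
      pvSum_ite_zero p.2 _ K hnd (h p (by simp))]
    ring

lemma pvGroup_const (bc : String → Bool) (x b : String) (l : List (String × String))
    (h : ∀ p ∈ l, p.2 = b) :
    l.countP (fun p => bc p.2 && p.1 == x)
      = if bc b then l.countP (fun p => p.1 == x) else 0 := by
  by_cases hb : bc b = true
  · rw [if_pos hb]
    apply List.countP_congr
    intro p hp
    simp [h p hp, hb]
  · rw [if_neg (by simp [hb])]
    rw [List.countP_eq_zero]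
    intro p hp
    simp [h p hp, hb]

lemma pvMain_count (k : Int) (K : List String) (ps' : List (String × String))
    (bc : String → Bool) (hnd : K.Nodup)
    (hps : ∀ p ∈ ps', p.2 ∈ K)
    (hbc : ∀ b ∈ K, (bc b = true ↔ k ≤ ((ps'.filter (fun p => p.2 == b)).length : Int)))
    (x : String) :
    (K.map (fun b => if PySem.Set.len ((ps'.filter (fun p => p.2 == b)).map Prod.fst) ≥ k
        then ((((ps'.filter (fun p => p.2 == b)).map Prod.fst).count x : Nat) : Int) else 0)).sum
      = ((ps'.countP (fun p => bc p.2 && p.1 == x) : Nat) : Int) := by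
  rw [pvCountP_partition K ps' _ hnd hps]
  have hterm : ∀ b ∈ K,
      (if PySem.Set.len ((ps'.filter (fun p => p.2 == b)).map Prod.fst) ≥ k
        then ((((ps'.filter (fun p => p.2 == b)).map Prod.fst).count x : Nat) : Int) else 0)
      = (((if bc b then (ps'.filter (fun p => p.2 == b)).countP (fun p => p.1 == x) else 0 : Nat)) : Int) := by
    intro b hb
    have hcnt : ((ps'.filter (fun p => p.2 == b)).map Prod.fst).count x
        = (ps'.filter (fun p => p.2 == b)).countP (fun p => p.1 == x) := by
      simp [List.count, List.countP_map]; rfl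
    have hcond : (PySem.Set.len ((ps'.filter (fun p => p.2 == b)).map Prod.fst) ≥ k)
        ↔ bc b = true := by
      rw [hbc b hb]
      simp [PySem.Set.len, List.length_map, ge_iff_le]
    by_cases hcb : bc b = true
    · rw [if_pos (hcond.2 hcb), if_pos hcb, hcnt]
    · rw [if_neg (fun hh => hcb (hcond.1 hh)), if_neg hcb]
      simp
  rw [List.map_congr_left hterm]
  have hgroup : ∀ b ∈ K,
      (ps'.filter (fun p => p.2 == b)).countP (fun p => bc p.2 && p.1 == x)
        = (if bc b then (ps'.filter (fun p => p.2 == b)).countP (fun p => p.1 == x) else 0) :=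
    fun b _ => pvGroup_const bc x b _ (fun p hp => by simpa using (List.mem_filter.1 hp).2)
  rw [List.map_congr_left hgroup, Nat.cast_list_sum, List.map_map]
  rfl

-- ===== VERDICT (by name: the statement is the Claim_ definition above) =====
theorem solution_spec : Claim_equal_solution := by
  intro id_list report k _ hpre
  have hlen : ∀ info ∈ report, ((PySem.Str.split? info " ").getD []).length = 2 :=
    fun i hi => (hpre i hi).1
  show solution id_list report k = solution_alt id_list report k
  set q := report.map pvParse with hqdef
  set S := PySem.Set.ofList q with hSdef
  -- Pre_ read off on parsed pairs
  have hq2 : ∀ p ∈ q, p.2 ∈ id_list := by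
    intro p hp
    obtain ⟨info, hi, rfl⟩ := List.mem_map.1 hp
    exact (hpre info hi).2.1
  have hq1 : ∀ p ∈ q, k ≤ ((S.countP (fun r => r.2 == p.2) : Nat) : Int) → p.1 ∈ id_list := by
    intro p hp hk
    obtain ⟨info, hi, rfl⟩ := List.mem_map.1 hp
    exact (hpre info hi).2.2 hk
  have hSq : ∀ p ∈ S, p ∈ q := fun p hp => (PySem.Set.mem_ofList q p).1 hp
  have hA : solution id_list report k
      = ((report.foldl pvRecordA
            (id_list.foldl (fun d name => d.insert name PySem.Set.empty) PySem.Dict.empty)).items.foldl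
          (pvCreditA k) (pvZeroDict id_list)).values := rfl
  rw [hA, pvFoldA_eq report _ hlen]
  set initA := id_list.foldl (fun d name => d.insert name PySem.Set.empty) PySem.Dict.empty with hinit
  set z := pvZeroDict id_list with hz
  set K := PySem.Set.ofList id_list with hK
  set dA := q.foldl pvRecP initA with hdA
  have hz0 : ∀ y, z.getD y 0 = 0 := by
    intro y
    rw [hz, pvZeroDict]
    exact pvGetD_init (0 : Int) id_list PySem.Dict.empty (fun _ => rfl) y
  have hzkeys : z.keys = K := by rw [hz, pvZeroDict, hK]; exact pvKeys_init _ _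
  have hnodK : K.Nodup := by rw [hK]; exact PySem.Set.nodup_ofList id_list
  -- A's per-user sets are the slices of S
  have hd : ∀ b, dA.getD b PySem.Set.empty = (S.filter (fun p => p.2 == b)).map Prod.fst := by
    intro b
    rw [hdA, hSdef, PySem.Set.ofList_eq_foldl]
    exact pvInvA q initA PySem.Set.empty
      (fun b => by
        rw [hinit, pvGetD_init PySem.Set.empty id_list PySem.Dict.empty (fun _ => rfl) b]
        rfl) b
  have hkeysA : dA.keys = K := by
    rw [hdA,
      show (q.foldl pvRecP initA).keys = PySem.Set.update initA.keys (q.map Prod.snd) from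
        PySem.Dict.keys_foldl_modify_key q Prod.snd PySem.Set.empty (fun _ p s => s.add p.1) initA,
      hinit, hK]
    rw [show (id_list.foldl (fun d name => d.insert name PySem.Set.empty) PySem.Dict.empty).keys
        = PySem.Set.ofList id_list from pvKeys_init _ _]
    apply pvSet_update_self
    intro x hx
    obtain ⟨p, hp, rfl⟩ := List.mem_map.1 hx
    exact (PySem.Set.mem_ofList id_list p.2).2 (hq2 p hp)
  have hitems : dA.items = K.map (fun b => (b, dA.getD b PySem.Set.empty)) := by
    have h := PySem.Dict.items_eq_map_keys dA (by rw [hkeysA]; exact hnodK) PySem.Set.empty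
    rwa [hkeysA] at h
  set banned : PySem.Set String := PySem.Set.ofList ((PySem.List.dedup id_list).filter (fun b =>
      k ≤ ((S.countP (fun p => p.2 == b) : Nat) : Int))) with hban
  have hdedup : PySem.List.dedup id_list = K := by rw [hK]; simp
  have hbc : ∀ b ∈ K, (banned.contains b = true
      ↔ k ≤ (((S.filter (fun p => p.2 == b)).length : Nat) : Int)) := by
    intro b hb
    rw [hban, PySem.Set.contains_iff, PySem.Set.mem_ofList, hdedup, List.mem_filter,
      List.countP_eq_length_filter]
    simp [hb]
  -- banned reporters are keys of counts
  have hbanRep : ∀ p ∈ dA.items, PySem.Set.len p.2 ≥ k → ∀ r ∈ p.2, r ∈ z.keys := by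
    intro p hp hlenp r hr
    rw [hitems] at hp
    obtain ⟨b, hb, rfl⟩ := List.mem_map.1 hp
    rw [hd b] at hr hlenp
    have hm : (r, b) ∈ S := (pvMem_fstFilter S b r).1 hr
    have hcnt : k ≤ ((S.countP (fun x => x.2 == b) : Nat) : Int) := by
      rw [List.countP_eq_length_filter]
      simpa [PySem.Set.len, List.length_map, ge_iff_le] using hlenp
    rw [hzkeys, hK]
    exact (PySem.Set.mem_ofList id_list r).2 (hq1 (r, b) (hSq _ hm) hcnt)
  have hkeysCA : (dA.items.foldl (pvCreditA k) z).keys = K := by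
    rw [pvCreditA_keys k dA.items z hbanRep, hzkeys]
  -- unfold B
  have hB : solution_alt id_list report k
      = (PySem.List.dedup id_list).map (fun name =>
          (((S.filter (fun p => p.1 == name)).countP (fun p => banned.contains p.2) : Nat) : Int)) := rfl
  rw [hB, hdedup,
    PySem.Dict.values_eq_map_keys _ (by rw [hkeysCA]; exact hnodK) 0, hkeysCA]
  apply List.map_congr_left
  intro x hx
  rw [pvCreditA_getD, hz0 x, hitems, List.map_map]
  have hrw : ∀ b ∈ K,
      ((fun p => if PySem.Set.len (Prod.snd p) ≥ k then ((Prod.snd p).count x : Int) else 0) ∘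
        fun b => (b, dA.getD b PySem.Set.empty)) b
      = (fun b => if PySem.Set.len ((S.filter (fun p => p.2 == b)).map Prod.fst) ≥ k
          then ((((S.filter (fun p => p.2 == b)).map Prod.fst).count x : Nat) : Int) else 0) b := by
    intro b _
    simp only [Function.comp]
    rw [hd b]
  rw [List.map_congr_left hrw, zero_add,
    pvMain_count k K S (fun s => banned.contains s) hnodK
      (fun p hp => by rw [hK]; exact (PySem.Set.mem_ofList id_list p.2).2 (hq2 p (hSq p hp)))
      (fun b hb => by simpa using hbc b hb) x, List.countP_filter]
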